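-- pv_equiv track=rewrite | github.com/tetsushi33/IshidaLab_research_project | dataset_preprocess/src_make_dataset/old/pocket_identification.py | create_fasta_to_pdb_mapping
-- ===== SOURCE A (Python) =====
-- def create_fasta_to_pdb_mapping(fasta_seq, pdb_residue_numbers):
--     fasta_to_pdb_mapping = {}
--     fasta_index, pdb_index = 0, 0
--
--     while fasta_index < len(fasta_seq) and pdb_index < len(pdb_residue_numbers):
--         if fasta_seq[fasta_index] != '-':
--             fasta_to_pdb_mapping[fasta_index + 1] = pdb_residue_numbers[pdb_index]
--             pdb_index += 1
--         fasta_index += 1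
--
--     return fasta_to_pdb_mapping
-- ===== SOURCE B (Python) =====
-- def create_fasta_to_pdb_mapping(fasta_seq, pdb_residue_numbers):
--     mapping = {}
--     offset, used = 0, 0
--     for seg in fasta_seq.split('-'):
--         for j, r in enumerate(pdb_residue_numbers[used:used + len(seg)]):
--             mapping[offset + j + 1] = r
--         used += len(seg)
--         offset += len(seg) + 1
--     return mapping
-- ===== Notes on version B (the rewrite author's own statement) =====
-- stated objective: alternative
-- what changed: Replaces A's character-by-character two-pointer while loop by a gap-delimited chunk algorithm: split the sequence on '-', and for each segment batch-assign a slice of the residue list to that segment's consecutive positions.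
import Mathlib
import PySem

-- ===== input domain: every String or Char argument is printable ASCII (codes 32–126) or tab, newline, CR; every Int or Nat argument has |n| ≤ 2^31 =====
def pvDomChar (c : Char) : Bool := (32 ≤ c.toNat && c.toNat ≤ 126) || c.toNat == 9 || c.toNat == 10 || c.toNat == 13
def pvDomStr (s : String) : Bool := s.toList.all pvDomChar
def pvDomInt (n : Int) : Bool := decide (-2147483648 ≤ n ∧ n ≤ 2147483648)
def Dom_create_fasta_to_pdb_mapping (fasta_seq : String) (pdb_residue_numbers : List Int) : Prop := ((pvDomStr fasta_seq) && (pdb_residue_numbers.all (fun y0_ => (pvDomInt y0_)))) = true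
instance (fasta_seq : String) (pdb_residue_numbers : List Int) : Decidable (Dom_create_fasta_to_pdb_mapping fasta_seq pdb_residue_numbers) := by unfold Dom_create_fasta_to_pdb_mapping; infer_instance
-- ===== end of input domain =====

-- B replaces A's character-by-character two-pointer while loop by a gap-delimited chunk
-- algorithm (split on '-', batch-assign a residue slice per segment); objective: alternative.


-- ===== PORT A =====
-- the while loop: advances through the fasta chars, consuming one pdb residue per non-gap char
def pvALoop : List Char → Int → List Int → PySem.Dict Int Int → PySem.Dict Int Int
  | [], _, _, d => d
  | _ :: _, _, [], d => d
  | c :: rest, fasta_index, p :: ps, d =>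
      if c ≠ '-' then
        pvALoop rest (fasta_index + 1) ps (d.insert (fasta_index + 1) p)
      else
        pvALoop rest (fasta_index + 1) (p :: ps) d

def create_fasta_to_pdb_mapping (fasta_seq : String) (pdb_residue_numbers : List Int) : List (Int × Int) :=
  (pvALoop fasta_seq.toList 0 pdb_residue_numbers PySem.Dict.empty).items

-- ===== PORT B =====
-- one iteration of Source B's outer 'for seg in fasta_seq.split('-')' loop; state = (mapping, offset, used)
def pvBStep (pdb_residue_numbers : List Int) (st : PySem.Dict Int Int × Int × Int) (seg : List Char) :
    PySem.Dict Int Int × Int × Int :=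
  ((PySem.List.enumerate (PySem.List.slice pdb_residue_numbers (some st.2.2) (some (st.2.2 + (seg.length : Int)))) 0).foldl
      (fun d p => d.insert (st.2.1 + p.1 + 1) p.2) st.1,
   st.2.1 + (seg.length : Int) + 1,
   st.2.2 + (seg.length : Int))

def create_fasta_to_pdb_mapping_alt (fasta_seq : String) (pdb_residue_numbers : List Int) : List (Int × Int) :=
  ((PySem.Chars.splitOn fasta_seq.toList ['-']).foldl (pvBStep pdb_residue_numbers)
    (PySem.Dict.empty, 0, 0)).1.items

-- ===== PRECONDITION & SPEC =====
def Spec_create_fasta_to_pdb_mapping (fasta_seq : String) (pdb_residue_numbers : List Int) (out : List (Int × Int)) : Prop := out = create_fasta_to_pdb_mapping_alt fasta_seq pdb_residue_numbers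
instance (fasta_seq : String) (pdb_residue_numbers : List Int) (out : List (Int × Int)) : Decidable (Spec_create_fasta_to_pdb_mapping fasta_seq pdb_residue_numbers out) := by unfold Spec_create_fasta_to_pdb_mapping; infer_instance

-- ===== CLAIM (what is proved, stated in full; the proofs are below) =====
def Claim_equal_create_fasta_to_pdb_mapping : Prop := ∀ (fasta_seq : String) (pdb_residue_numbers : List Int), Dom_create_fasta_to_pdb_mapping fasta_seq pdb_residue_numbers → Spec_create_fasta_to_pdb_mapping fasta_seq pdb_residue_numbers (create_fasta_to_pdb_mapping fasta_seq pdb_residue_numbers)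

-- ===== LEMMAS AND PROOFS =====

-- the 1-based positions of non-gap characters, starting from offset i
def pvPosFrom : List Char → Int → List Int
  | [], _ => []
  | c :: rest, i => if c ≠ '-' then (i + 1) :: pvPosFrom rest (i + 1) else pvPosFrom rest (i + 1)

theorem pvALoop_cons_cons (c : Char) (rest : List Char) (i : Int) (p : Int) (ps : List Int)
    (d : PySem.Dict Int Int) :
    pvALoop (c :: rest) i (p :: ps) d =
      if c ≠ '-' then pvALoop rest (i + 1) ps (d.insert (i + 1) p)
      else pvALoop rest (i + 1) (p :: ps) d := rfl

theorem pvALoop_items (chars : List Char) (i : Int) (pdb : List Int) (d : PySem.Dict Int Int)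
    (hk : ∀ k ∈ d.keys, k ≤ i) :
    (pvALoop chars i pdb d).items = d.items ++ (pvPosFrom chars i).zip pdb := by
  induction chars generalizing i pdb d with
  | nil => simp [pvALoop, pvPosFrom]
  | cons c rest ih =>
      cases pdb with
      | nil =>
          show d.items = d.items ++ (pvPosFrom (c :: rest) i).zip []
          simp
      | cons p ps =>
          rw [pvALoop_cons_cons]
          by_cases h : c = '-'
          · rw [if_neg (by simp [h])]
            have : pvPosFrom (c :: rest) i = pvPosFrom rest (i + 1) := by
              simp [pvPosFrom, h]
            rw [this]
            exact ih (i + 1) (p :: ps) d (fun k hkmem => le_trans (hk k hkmem) (by omega))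
          · rw [if_pos (by simp [h])]
            have hpos : pvPosFrom (c :: rest) i = (i + 1) :: pvPosFrom rest (i + 1) := by
              simp [pvPosFrom, h]
            rw [hpos]
            have hnc : d.contains (i + 1) = false := by
              by_contra hc
              have : d.contains (i + 1) = true := by
                cases hcc : d.contains (i + 1) with
                | false => exact absurd hcc hc
                | true => rfl
              have := (PySem.Dict.contains_iff_mem_keys d (i + 1)).mp this
              have := hk _ this
              omega
            have hk' : ∀ k ∈ (d.insert (i + 1) p).keys, k ≤ i + 1 := by
              intro k hkm
              rw [PySem.Dict.mem_keys_insert] at hkm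
              rcases hkm with rfl | hmem
              · omega
              · exact le_trans (hk k hmem) (by omega)
            rw [ih (i + 1) ps (d.insert (i + 1) p) hk']
            simp only [PySem.Dict.items_insert, hnc]
            simp [List.zip_cons_cons, List.append_assoc]

-- structural form of Python's split('-') (single-character separator)
def pvSplit : List Char → List (List Char)
  | [] => [[]]
  | c :: rest => if c = '-' then [] :: pvSplit rest else (pvSplit rest).modifyHead (c :: ·)

theorem pvSplit_ne_nil (l : List Char) : pvSplit l ≠ [] := by
  induction l with
  | nil => simp [pvSplit]
  | cons c rest ih =>
      simp only [pvSplit]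
      split_ifs
      · simp
      · cases h : pvSplit rest with
        | nil => exact absurd h ih
        | cons s t => simp

theorem pvGo_eq (fuel : Nat) : ∀ (l cur : List Char) (acc : List (List Char)), l.length ≤ fuel →
    PySem.Chars.splitOn.go ['-'] fuel l cur acc
      = acc.reverse ++ (pvSplit l).modifyHead (cur.reverse ++ ·) := by
  induction fuel with
  | zero =>
      intro l cur acc h
      have hl : l = [] := by cases l <;> simp_all
      subst hl
      simp [PySem.Chars.splitOn.go, pvSplit]
  | succ fuel ih =>
      intro l cur acc h
      cases l with
      | nil => simp [PySem.Chars.splitOn.go, pvSplit]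
      | cons c rest =>
          by_cases hc : c = '-'
          · subst hc
            rw [show PySem.Chars.splitOn.go ['-'] (fuel + 1) ('-' :: rest) cur acc
                  = PySem.Chars.splitOn.go ['-'] fuel rest [] (cur.reverse :: acc) by
                simp [PySem.Chars.splitOn.go, List.isPrefixOf]]
            rw [ih rest [] (cur.reverse :: acc) (by simpa using h)]
            cases hs : pvSplit rest <;> simp [pvSplit, hs]
          · rw [show PySem.Chars.splitOn.go ['-'] (fuel + 1) (c :: rest) cur acc
                  = PySem.Chars.splitOn.go ['-'] fuel rest (c :: cur) acc by
                simp [PySem.Chars.splitOn.go, List.isPrefixOf, show ¬ '-' = c from fun hh => hc hh.symm]]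
            rw [ih rest (c :: cur) acc (by simpa using h)]
            simp only [pvSplit, if_neg hc]
            cases hs : pvSplit rest with
            | nil => exact absurd hs (pvSplit_ne_nil rest)
            | cons s t => simp

theorem pvSplitOn_eq (l : List Char) : PySem.Chars.splitOn l ['-'] = pvSplit l := by
  unfold PySem.Chars.splitOn
  rw [pvGo_eq (l.length + 1) l [] [] (by omega)]
  cases h : pvSplit l with
  | nil => exact absurd h (pvSplit_ne_nil l)
  | cons s t => simp

-- the positions B's chunk loop writes within one segment: o+1, o+2, ..., o+n
def pvRangePos (n : Nat) (o : Int) : List Int :=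
  (List.range n).map (fun (i : Nat) => o + (i : Int) + 1)

theorem pvRangePos_length (n : Nat) (o : Int) : (pvRangePos n o).length = n := by
  simp [pvRangePos]

theorem pvRangePos_succ (n : Nat) (o : Int) : pvRangePos (n + 1) o = (o + 1) :: pvRangePos n (o + 1) := by
  rw [pvRangePos, List.range_succ_eq_map, List.map_cons, List.map_map]
  congr 1
  · push_cast; omega
  · apply List.map_congr_left
    intro i _
    simp only [Function.comp_apply]
    push_cast
    omega

theorem pvRangePos_take (n m : Nat) (o : Int) (h : m ≤ n) :
    (pvRangePos n o).take m = pvRangePos m o := by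
  rw [pvRangePos, ← List.map_take, List.take_range, Nat.min_eq_left h]
  rfl

-- the positions B's chunk loop writes, per segment
def pvPosOfSegs : List (List Char) → Int → List Int
  | [], _ => []
  | s :: t, o => pvRangePos s.length o ++ pvPosOfSegs t (o + s.length + 1)

theorem pvPosOfSegs_pvSplit (l : List Char) : ∀ (o : Int), pvPosOfSegs (pvSplit l) o = pvPosFrom l o := by
  induction l with
  | nil => intro o; simp [pvSplit, pvPosOfSegs, pvPosFrom, pvRangePos]
  | cons c rest ih =>
      intro o
      by_cases hc : c = '-'
      · subst hc
        simp only [pvSplit, if_true]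
        show pvPosOfSegs ([] :: pvSplit rest) o = pvPosFrom ('-' :: rest) o
        simp [pvPosOfSegs, pvPosFrom, ih, pvRangePos]
      · simp only [pvSplit, if_neg hc]
        cases hs : pvSplit rest with
        | nil => exact absurd hs (pvSplit_ne_nil rest)
        | cons s t =>
            show pvPosOfSegs ((c :: s) :: t) o = pvPosFrom (c :: rest) o
            rw [show pvPosFrom (c :: rest) o = (o + 1) :: pvPosFrom rest (o + 1) by
              simp [pvPosFrom, hc]]
            have hrest : pvPosFrom rest (o + 1) = pvPosOfSegs (s :: t) (o + 1) := by
              rw [← ih (o + 1), hs]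
            rw [hrest]
            show pvRangePos (s.length + 1) o ++ pvPosOfSegs t (o + ((s.length + 1 : Nat) : Int) + 1)
                = (o + 1) :: (pvRangePos s.length (o + 1) ++ pvPosOfSegs t ((o + 1) + (s.length : Int) + 1))
            rw [pvRangePos_succ, List.cons_append,
              show o + ((s.length + 1 : Nat) : Int) + 1 = (o + 1) + (s.length : Int) + 1 by
                push_cast; omega]

-- zip helper facts
theorem pvZip_take_right {α β : Type} (xs : List α) (ys : List β) :
    xs.zip (ys.take xs.length) = xs.zip ys := by
  induction xs generalizing ys with
  | nil => simp
  | cons x xs ih => cases ys <;> simp [ih]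

theorem pvZip_take_left {α β : Type} (xs : List α) (ys : List β) :
    (xs.take ys.length).zip ys = xs.zip ys := by
  induction xs generalizing ys with
  | nil => simp
  | cons x xs ih => cases ys <;> simp [ih]

theorem pvZip_append {α β : Type} (xs ys : List α) (l : List β) :
    (xs ++ ys).zip l = xs.zip l ++ ys.zip (l.drop xs.length) := by
  induction xs generalizing l with
  | nil => simp
  | cons x xs ih => cases l <;> simp [ih]

-- the inner 'for j, r in enumerate(chunk)' loop: fresh increasing keys append in order
theorem pvInner (chunk : List Int) : ∀ (j : Nat) (o : Int) (d : PySem.Dict Int Int),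
    (∀ k ∈ d.keys, k < o + (j : Int) + 1) → d.keys.Nodup →
    (((PySem.List.enumerate chunk (j : Int)).foldl (fun d p => d.insert (o + p.1 + 1) p.2) d).items
        = d.items ++ ((pvRangePos chunk.length (o + (j : Int))).zip chunk))
    ∧ (∀ k ∈ ((PySem.List.enumerate chunk (j : Int)).foldl (fun d p => d.insert (o + p.1 + 1) p.2) d).keys,
        k < o + (j : Int) + (chunk.length : Int) + 1)
    ∧ ((PySem.List.enumerate chunk (j : Int)).foldl (fun d p => d.insert (o + p.1 + 1) p.2) d).keys.Nodup := by
  induction chunk with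
  | nil =>
      intro j o d hk hnd
      refine ⟨by simp [PySem.List.enumerate_nil, pvRangePos], ?_,
        by simpa [PySem.List.enumerate_nil] using hnd⟩
      intro k hkm
      have := hk k (by simpa [PySem.List.enumerate_nil] using hkm)
      simp only [List.length_nil]
      push_cast
      omega
  | cons c cs ih =>
      intro j o d hk hnd
      have hstep : PySem.List.enumerate (c :: cs) (j : Int)
          = ((j : Int), c) :: PySem.List.enumerate cs ((j + 1 : Nat) : Int) := by
        rw [PySem.List.enumerate_cons]
        push_cast
        ring_nf
      have hnc : d.contains (o + (j : Int) + 1) = false := by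
        by_contra hcb
        have hct : d.contains (o + (j : Int) + 1) = true := by
          cases hcc : d.contains (o + (j : Int) + 1) with
          | false => exact absurd hcc hcb
          | true => rfl
        have := hk _ ((PySem.Dict.contains_iff_mem_keys d _).mp hct)
        omega
      have hk' : ∀ k ∈ (d.insert (o + (j : Int) + 1) c).keys, k < o + ((j + 1 : Nat) : Int) + 1 := by
        intro k hkm
        rw [PySem.Dict.mem_keys_insert] at hkm
        rcases hkm with rfl | hmem
        · push_cast; omega
        · have := hk k hmem; push_cast at *; omega
      have hnd' : (d.insert (o + (j : Int) + 1) c).keys.Nodup :=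
        PySem.Dict.nodup_keys_insert d _ c hnd
      obtain ⟨hit, hbd, hnd''⟩ := ih (j + 1) o (d.insert (o + (j : Int) + 1) c) hk' hnd'
      rw [show o + ((j + 1 : Nat) : Int) = o + (j : Int) + 1 by push_cast; omega] at hit
      rw [hstep]
      simp only [List.foldl_cons]
      refine ⟨?_, ?_, hnd''⟩
      · rw [hit, PySem.Dict.items_insert_of_not_contains d c hnc]
        rw [show (c :: cs).length = cs.length + 1 from rfl, pvRangePos_succ,
          List.zip_cons_cons, List.append_assoc]
        simp
      · intro k hkm
        have := hbd k hkm
        simp only [List.length_cons] at *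
        push_cast at *
        omega

-- the outer 'for seg in fasta_seq.split('-')' loop
theorem pvBLoop (pdb : List Int) (segs : List (List Char)) : ∀ (o u : Nat) (d : PySem.Dict Int Int),
    (∀ k ∈ d.keys, k ≤ (o : Int)) → d.keys.Nodup →
    ((segs.foldl (pvBStep pdb) (d, (o : Int), (u : Int))).1).items
      = d.items ++ (pvPosOfSegs segs (o : Int)).zip (pdb.drop u) := by
  induction segs with
  | nil => intro o u d hk hnd; simp [pvPosOfSegs]
  | cons seg t ih =>
      intro o u d hk hnd
      have hchunk : PySem.List.slice pdb (some (u : Int)) (some ((u : Int) + (seg.length : Int)))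
          = (pdb.drop u).take seg.length := PySem.List.slice_natCast_add pdb u seg.length
      set chunk := (pdb.drop u).take seg.length with hchunkdef
      have hclen : chunk.length ≤ seg.length := by
        simp [hchunkdef]
      obtain ⟨hit, hbd, hnd'⟩ := pvInner chunk 0 (o : Int) d
        (by intro k hkm; have := hk k hkm; push_cast; omega) hnd
      have hstate : pvBStep pdb (d, (o : Int), (u : Int)) seg
          = ((PySem.List.enumerate chunk ((0 : Nat) : Int)).foldl
              (fun d p => d.insert ((o : Int) + p.1 + 1) p.2) d,
             ((o + seg.length + 1 : Nat) : Int), ((u + seg.length : Nat) : Int)) := by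
        simp only [pvBStep, hchunk]
        push_cast
        rfl
      rw [List.foldl_cons, hstate]
      rw [ih (o + seg.length + 1) (u + seg.length) _
        (by intro k hkm; have := hbd k hkm; push_cast at *; omega) hnd']
      rw [hit]
      have hposrange : (pvRangePos seg.length (o : Int)).zip (pdb.drop u)
          = (pvRangePos chunk.length ((o : Int) + ((0 : Nat) : Int))).zip chunk := by
        rw [← pvZip_take_right (pvRangePos seg.length (o : Int)) (pdb.drop u), pvRangePos_length,
          ← hchunkdef, ← pvZip_take_left (pvRangePos seg.length (o : Int)) chunk,
          pvRangePos_take seg.length chunk.length (o : Int) hclen]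
        norm_num
      rw [show pvPosOfSegs (seg :: t) (o : Int)
            = pvRangePos seg.length (o : Int) ++ pvPosOfSegs t ((o : Int) + (seg.length : Int) + 1) from rfl]
      rw [pvZip_append, hposrange, pvRangePos_length]
      rw [show (pdb.drop u).drop seg.length = pdb.drop (u + seg.length) by
        rw [List.drop_drop]]
      rw [List.append_assoc]
      congr 3

-- ===== VERDICT (by name: the statement is the Claim_ definition above) =====
theorem create_fasta_to_pdb_mapping_spec : Claim_equal_create_fasta_to_pdb_mapping := by
  intro fasta_seq pdb _
  unfold Spec_create_fasta_to_pdb_mapping create_fasta_to_pdb_mapping create_fasta_to_pdb_mapping_alt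
  rw [pvALoop_items fasta_seq.toList 0 pdb PySem.Dict.empty (by simp [PySem.Dict.keys_empty])]
  rw [pvSplitOn_eq]
  have hb := pvBLoop pdb (pvSplit fasta_seq.toList) 0 0 PySem.Dict.empty
    (by simp [PySem.Dict.keys_empty]) PySem.Dict.nodup_keys_empty
  simp only [Nat.cast_zero, List.drop_zero] at hb
  rw [hb, pvPosOfSegs_pvSplit]
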